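-- pv_equiv track=rewrite | github.com/dipeshsingh253/atom-etl | src/modules/agent/citations.py | _stem
-- ===== SOURCE A (Python) =====
-- def _stem(word: str) -> str:
--     """Conservative suffix-stripping stemmer."""
--     if len(word) <= 4:
--         return word
--     for sfx in (
--         "ation", "tion", "sion", "ment", "ness",
--         "ying", "ies", "ing", "ous", "ive", "ful",
--         "ers", "est", "ity", "ble", "ant", "ent",
--         "ate", "ize", "ise", "ely", "ily",
--         "ees", "ed", "es", "er", "ly", "al", "en",
--     ):
--         if word.endswith(sfx) and len(word) - len(sfx) >= 3:
--             return word[: -len(sfx)]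
--     if word.endswith("s") and not word.endswith("ss") and len(word) > 4:
--         return word[:-1]
--     return word
-- ===== SOURCE B (Python) =====
-- # B: idiomatic rewrite — a precomputed last-letter index (dict of buckets) replaces
-- # the full 29-suffix linear scan: only suffixes ending in word's last char are tried,
-- # via next() over a generator yielding the cut position (positive slice index).
-- _BUCKETS = {
--     "n": ("ation", "tion", "sion", "en"),
--     "t": ("ment", "est", "ant", "ent"),
--     "s": ("ness", "ies", "ous", "ers", "ees", "es"),
--     "g": ("ying", "ing"),
--     "e": ("ive", "ble", "ate", "ize", "ise"),
--     "l": ("ful", "al"),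
--     "y": ("ity", "ely", "ily", "ly"),
--     "r": ("er",),
--     "d": ("ed",),
-- }
--
-- def _stem(word: str) -> str:
--     """Conservative suffix-stripping stemmer."""
--     if len(word) <= 4:
--         return word
--     cut = next(
--         (len(word) - len(sfx)
--          for sfx in _BUCKETS.get(word[-1], ())
--          if word.endswith(sfx) and len(word) - len(sfx) >= 3),
--         None,
--     )
--     if cut is not None:
--         return word[:cut]
--     if word.endswith("s") and not word.endswith("ss"):
--         return word[:-1]
--     return word
-- ===== Notes on version B (the rewrite author's own statement) =====
-- stated objective: idiomatic
-- what changed: B precomputes a last-letter index (dict mapping each suffix's final character to its ordered bucket) and uses next() over a generator of cut positions on that bucket, instead of A's linear scan over all 29 suffixes; the redundant second length test in the plural fallback is dropped.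
import Mathlib
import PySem

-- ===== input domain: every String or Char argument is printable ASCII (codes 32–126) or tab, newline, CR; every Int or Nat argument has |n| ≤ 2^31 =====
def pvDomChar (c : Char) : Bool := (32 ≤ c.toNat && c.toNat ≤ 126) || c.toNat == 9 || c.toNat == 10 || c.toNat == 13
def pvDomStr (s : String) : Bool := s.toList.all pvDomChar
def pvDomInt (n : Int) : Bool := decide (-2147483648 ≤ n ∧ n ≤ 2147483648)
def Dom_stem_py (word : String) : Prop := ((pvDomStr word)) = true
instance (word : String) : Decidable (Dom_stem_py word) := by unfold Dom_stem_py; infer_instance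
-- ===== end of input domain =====

-- B replaces A's full 29-suffix linear scan by a precomputed last-letter index
-- (dict of suffix buckets); only suffixes ending in the word's last char are tried.

-- ===== PORT A =====
def pvSuffixes : List String :=
  ["ation", "tion", "sion", "ment", "ness",
   "ying", "ies", "ing", "ous", "ive", "ful",
   "ers", "est", "ity", "ble", "ant", "ent",
   "ate", "ize", "ise", "ely", "ily",
   "ees", "ed", "es", "er", "ly", "al", "en"]

-- the 'for sfx in (…): if …: return …' loop, early return as Option
def stemLoopA (w : String) : List String → Option String
  | [] => none
  | sfx :: rest =>
      if PySem.Str.endswith w sfx && decide ((PySem.Str.len w : Int) - (PySem.Str.len sfx : Int) ≥ 3)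
      then some (PySem.Str.slice w none (some (-(PySem.Str.len sfx : Int))))
      else stemLoopA w rest

def stem_py (word : String) : String :=
  if PySem.Str.len word ≤ 4 then word
  else
    match stemLoopA word pvSuffixes with
    | some r => r
    | none =>
        if PySem.Str.endswith word "s" && !(PySem.Str.endswith word "ss")
            && decide (PySem.Str.len word > 4)
        then PySem.Str.slice word none (some (-1))
        else word

-- ===== PORT B =====
-- Source B's _BUCKETS dict literal; its length-1 string keys are Chars here
def pvBuckets : PySem.Dict Char (List String) :=
  PySem.Dict.mk
    [('n', ["ation", "tion", "sion", "en"]),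
     ('t', ["ment", "est", "ant", "ent"]),
     ('s', ["ness", "ies", "ous", "ers", "ees", "es"]),
     ('g', ["ying", "ing"]),
     ('e', ["ive", "ble", "ate", "ize", "ise"]),
     ('l', ["ful", "al"]),
     ('y', ["ity", "ely", "ily", "ly"]),
     ('r', ["er"]),
     ('d', ["ed"])]

-- Source B's generator: first cut position len(word)-len(sfx) over the bucket, as Option
def stemCut (w : String) : List String → Option Int
  | [] => none
  | sfx :: rest =>
      if PySem.Str.endswith w sfx && decide ((PySem.Str.len w : Int) - (PySem.Str.len sfx : Int) ≥ 3)
      then some ((PySem.Str.len w : Int) - (PySem.Str.len sfx : Int))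
      else stemCut w rest

def stem_py_alt (word : String) : String :=
  if PySem.Str.len word ≤ 4 then word
  else
    -- word[-1]: under the guard word is nonempty, so pyGet? is always 'some'
    match stemCut word (pvBuckets.getD ((PySem.Str.pyGet? word (-1)).getD ' ') []) with
    | some cut => PySem.Str.slice word none (some cut)
    | none =>
        if PySem.Str.endswith word "s" && !(PySem.Str.endswith word "ss")
        then PySem.Str.slice word none (some (-1))
        else word

-- ===== PRECONDITION & SPEC =====
def Spec_stem_py (word : String) (out : String) : Prop := out = stem_py_alt word
instance (word : String) (out : String) : Decidable (Spec_stem_py word out) := by unfold Spec_stem_py; infer_instance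

-- ===== CLAIM (what is proved, stated in full; the proofs are below) =====
def Claim_equal_stem_py : Prop := ∀ (word : String), Dom_stem_py word → Spec_stem_py word (stem_py word)

-- ===== LEMMAS AND PROOFS =====

-- a nonempty suffix whose last char differs from w's last char can never match
lemma endswith_false_of_last_ne (w s : String) (c : Char)
    (hw : w.toList.getLast? = some c) (hsne : s.toList ≠ [])
    (hs : s.toList.getLast? ≠ some c) : PySem.Str.endswith w s = false := by
  by_contra h
  have h' : PySem.Str.endswith w s = true := by
    cases hb : PySem.Str.endswith w s with
    | true => rfl
    | false => exact absurd hb h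
  have hsuf : s.toList <:+ w.toList := by
    have := PySem.Str.endswith_eq w s
    rw [this] at h'
    exact (PySem.Chars.endswith_iff _ _).mp h'
  obtain ⟨t, ht⟩ := hsuf
  have : w.toList.getLast? = s.toList.getLast? := by
    rw [← ht, List.getLast?_append_of_ne_nil _ hsne]
  exact hs (by rw [← this, hw])

-- A's scan over a list of nonempty suffixes equals B's cut-index scan over the
-- sublist of suffixes ending in w's last char
lemma loopA_eq_cut_filter (w : String) (c : Char) (hw : w.toList.getLast? = some c) :
    ∀ l : List String, (∀ s ∈ l, s.toList ≠ []) →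
      stemLoopA w l = (stemCut w (l.filter (fun s => s.toList.getLast? == some c))).map
        (fun cut => PySem.Str.slice w none (some cut)) := by
  intro l
  induction l with
  | nil => intro _; rfl
  | cons s rest ih =>
      intro hne
      rw [List.filter_cons]
      by_cases hs : s.toList.getLast? = some c
      · rw [if_pos (by simp [hs])]
        simp only [stemLoopA, stemCut]
        split
        · next hcond =>
            -- the matched suffix is nonempty and cuts within the word:
            -- word[:-len(sfx)] = word[:len(word)-len(sfx)]
            simp only [Bool.and_eq_true, decide_eq_true_eq] at hcond
            have hsne : s.toList ≠ [] := hne s (List.mem_cons_self)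
            have hstl : s.toList.length = s.length := String.length_toList
            have hwtl : w.toList.length = w.length := String.length_toList
            have hsl : 0 < s.toList.length := List.length_pos_of_ne_nil hsne
            have hcond2 := hcond.2
            simp only [PySem.Str.len_eq] at hcond2
            have hle : s.length ≤ w.length := by omega
            simp only [Option.map_some]
            congr 1
            simp only [PySem.Str.slice, PySem.Str.len_eq]
            congr 1
            simp only [PySem.Chars.slice_eq_listSlice, hstl, hwtl]
            rw [PySem.List.slice_to_neg_natCast w.toList s.length (by omega)]
            rw [show ((w.length : Int) - (s.length : Int)) =
                  ((w.length - s.length : Nat) : Int) by omega]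
            rw [PySem.List.slice_to_natCast w.toList (w.length - s.length)]
            rw [hwtl]
        · exact ih (fun x hx => hne x (List.mem_cons_of_mem _ hx))
      · have hfe := endswith_false_of_last_ne w s c hw (hne s (List.mem_cons_self)) hs
        have hfe' : PySem.Chars.endswith w.toList s.toList = false := by
          rw [← PySem.Str.endswith_eq]; exact hfe
        rw [if_neg (by simp [hs])]
        rw [show stemLoopA w (s :: rest) = stemLoopA w rest from by simp [stemLoopA, hfe']]
        exact ih (fun x hx => hne x (List.mem_cons_of_mem _ hx))

-- the precomputed dict really is the last-letter index of pvSuffixes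
lemma buckets_getD (c : Char) :
    pvBuckets.getD c [] = pvSuffixes.filter (fun s => s.toList.getLast? == some c) := by
  by_cases h1 : c = 'n'; · subst h1; decide
  by_cases h2 : c = 't'; · subst h2; decide
  by_cases h3 : c = 's'; · subst h3; decide
  by_cases h4 : c = 'g'; · subst h4; decide
  by_cases h5 : c = 'e'; · subst h5; decide
  by_cases h6 : c = 'l'; · subst h6; decide
  by_cases h7 : c = 'y'; · subst h7; decide
  by_cases h8 : c = 'r'; · subst h8; decide
  by_cases h9 : c = 'd'; · subst h9; decide
  have e1 : ('n' == c) = false := by simp [Ne.symm h1]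
  have e2 : ('t' == c) = false := by simp [Ne.symm h2]
  have e3 : ('s' == c) = false := by simp [Ne.symm h3]
  have e4 : ('g' == c) = false := by simp [Ne.symm h4]
  have e5 : ('e' == c) = false := by simp [Ne.symm h5]
  have e6 : ('l' == c) = false := by simp [Ne.symm h6]
  have e7 : ('y' == c) = false := by simp [Ne.symm h7]
  have e8 : ('r' == c) = false := by simp [Ne.symm h8]
  have e9 : ('d' == c) = false := by simp [Ne.symm h9]
  simp [pvBuckets, pvSuffixes, PySem.Dict.getD, PySem.Dict.get?, List.filter,
        e1, e2, e3, e4, e5, e6, e7, e8, e9]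

-- ===== VERDICT (by name: the statement is the Claim_ definition above) =====
theorem stem_py_spec : Claim_equal_stem_py := by
  intro word _
  unfold Spec_stem_py stem_py stem_py_alt
  by_cases h4 : PySem.Str.len word ≤ 4
  · rw [if_pos h4, if_pos h4]
  · rw [if_neg h4, if_neg h4]
    simp only [PySem.Str.len_eq] at h4
    have hlen : 4 < word.toList.length := by omega
    have hne : word.toList ≠ [] := by
      intro h; rw [h] at hlen; simp at hlen
    obtain ⟨c, hc⟩ : ∃ c, word.toList.getLast? = some c := by
      cases h : word.toList.getLast? with
      | some c => exact ⟨c, rfl⟩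
      | none => exact absurd (List.getLast?_eq_none_iff.mp h) hne
    have hget : (PySem.Str.pyGet? word (-1)).getD ' ' = c := by
      rw [PySem.Str.pyGet?_eq, PySem.Chars.pyGet?_eq_listPyGet?,
          PySem.List.pyGet?_neg_one, hc]
      rfl
    rw [hget, buckets_getD c,
        loopA_eq_cut_filter word c hc pvSuffixes (by decide)]
    cases stemCut word (pvSuffixes.filter (fun s => s.toList.getLast? == some c)) with
    | some cut => rfl
    | none =>
        -- fallbacks: A additionally tests len(word) > 4, true under the guard
        simp only [Option.map_none]
        have h5 : decide ((PySem.Str.len word : Int) > 4) = true := by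
          have := @String.length_toList word
          simp [PySem.Str.len_eq]
          omega
        rw [h5, Bool.and_true]
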